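-- pv_equiv track=rewrite | github.com/RyanKelleyCosing/hybrid-document-intelligence-platform | src/document_intelligence/public_request_context.py | _build_approximate_location
-- ===== SOURCE A (Python) =====
-- from collections.abc import Mapping
--
-- _COARSE_LOCATION_UNAVAILABLE = (
--     "Unavailable until coarse edge geolocation headers are configured."
-- )
--
-- def _get_header_value(headers: Mapping[str, str], *names: str) -> str | None:
--     for name in names:
--         for header_name, header_value in headers.items():
--             if header_name.lower() == name.lower() and header_value.strip():
--                 return header_value.strip()
--
--     return None
--
-- def _build_approximate_location(
--     headers: Mapping[str, str],
--     provider_approximate_location: str | None = None,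
-- ) -> str:
--     country = _get_header_value(
--         headers,
--         "CF-IPCountry",
--         "X-AppEngine-Country",
--         "X-Country-Code",
--         "X-Geo-Country",
--     )
--     region = _get_header_value(
--         headers,
--         "X-AppEngine-Region",
--         "X-Geo-Region",
--     )
--     location_parts = tuple(
--         value
--         for value in (country, region)
--         if value and value.upper() not in {"T1", "XX", "UNKNOWN"}
--     )
--     if location_parts:
--         return " / ".join(dict.fromkeys(location_parts))
--
--     if provider_approximate_location:
--         return provider_approximate_location
--
--     return _COARSE_LOCATION_UNAVAILABLE
-- ===== SOURCE B (Python) =====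
-- _COARSE_LOCATION_UNAVAILABLE = (
--     "Unavailable until coarse edge geolocation headers are configured."
-- )
--
-- # priority order: four country header names, then two region header names
-- _SLOT_INDEX = {
--     "cf-ipcountry": 0,
--     "x-appengine-country": 1,
--     "x-country-code": 2,
--     "x-geo-country": 3,
--     "x-appengine-region": 4,
--     "x-geo-region": 5,
-- }
--
-- _NOISE = {"T1", "XX", "UNKNOWN"}
--
--
-- def _usable(value):
--     return value is not None and value.upper() not in _NOISE
--
--
-- def _build_approximate_location(headers, provider_approximate_location=None):
--     # Single pass filling a fixed slot table (first non-empty stripped value per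
--     # candidate header name), then an explicit branch on the two picked values.
--     slots = [None] * 6
--     for name, value in headers.items():
--         i = _SLOT_INDEX.get(name.lower())
--         if i is not None and slots[i] is None:
--             v = value.strip()
--             if v:
--                 slots[i] = v
--     country = next((v for v in slots[:4] if v is not None), None)
--     region = next((v for v in slots[4:] if v is not None), None)
--     country = country if _usable(country) else None
--     region = region if _usable(region) else None
--     if country is not None and region is not None:
--         return country if country == region else country + " / " + region
--     if country is not None:
--         return country
--     if region is not None:
--         return region
--     if provider_approximate_location:
--         return provider_approximate_location
--     return _COARSE_LOCATION_UNAVAILABLE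
-- ===== Notes on version B (the rewrite author's own statement) =====
-- stated objective: idiomatic
-- what changed: B replaces A's repeated per-candidate-name scans over the headers (_get_header_value's nested loops) with a single pass filling a fixed six-slot table of first non-empty stripped values, and replaces the tuple-filter/dict.fromkeys/join tail with an explicit branch on the two picked values.
import Mathlib
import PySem

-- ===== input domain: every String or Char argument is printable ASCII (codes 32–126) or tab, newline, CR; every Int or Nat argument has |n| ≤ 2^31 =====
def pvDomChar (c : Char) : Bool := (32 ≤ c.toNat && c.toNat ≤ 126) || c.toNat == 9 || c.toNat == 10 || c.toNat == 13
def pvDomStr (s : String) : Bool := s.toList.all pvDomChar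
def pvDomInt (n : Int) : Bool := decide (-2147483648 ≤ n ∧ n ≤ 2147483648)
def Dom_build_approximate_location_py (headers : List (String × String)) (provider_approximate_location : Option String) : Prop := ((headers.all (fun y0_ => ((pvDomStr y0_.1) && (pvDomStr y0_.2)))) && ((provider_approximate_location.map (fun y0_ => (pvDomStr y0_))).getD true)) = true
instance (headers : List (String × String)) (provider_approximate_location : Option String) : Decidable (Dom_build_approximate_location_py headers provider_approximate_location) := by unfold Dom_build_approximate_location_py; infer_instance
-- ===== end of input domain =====

-- B replaces A's repeated per-candidate-name scans (nested loops, one scan per name)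
-- with a single pass filling a fixed six-slot table (first non-empty stripped value per
-- candidate header name) followed by an explicit branch; objective: more idiomatic.

def pvCoarseUnavailable : String :=
  "Unavailable until coarse edge geolocation headers are configured."

-- ===== PORT A =====
-- _get_header_value: for each name in order, scan headers for the first one whose
-- lower-cased name matches and whose stripped value is non-empty.
def pvA_getHeader (headers : List (String × String)) : List String → Option String
  | [] => none
  | n :: rest =>
    match headers.find? (fun h =>
        (PySem.Str.lower h.1 == PySem.Str.lower n) && !(PySem.Str.strip h.2 == "")) with
    | some h => some (PySem.Str.strip h.2)
    | none => pvA_getHeader headers rest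

def build_approximate_location_py (headers : List (String × String)) (provider_approximate_location : Option String) : String :=
  let country := pvA_getHeader headers
    ["CF-IPCountry", "X-AppEngine-Country", "X-Country-Code", "X-Geo-Country"]
  let region := pvA_getHeader headers ["X-AppEngine-Region", "X-Geo-Region"]
  let location_parts := ([country, region].filterMap id).filter (fun v =>
    !(v == "") && !((["T1", "XX", "UNKNOWN"] : List String).contains (PySem.Str.upper v)))
  if location_parts ≠ [] then
    PySem.Str.join " / " (PySem.List.dedup location_parts)  -- " / ".join(dict.fromkeys(..))
  else
    match provider_approximate_location with
    | some p => if p == "" then pvCoarseUnavailable else p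
    | none => pvCoarseUnavailable

-- ===== PORT B =====
-- Six slots, one per candidate header name (country priority order, then region).
structure PvSlots where
  c1 : Option String
  c2 : Option String
  c3 : Option String
  c4 : Option String
  r1 : Option String
  r2 : Option String
deriving Repr, DecidableEq

-- fill a slot: first non-empty stripped value for its header name wins
def pvB_upd (key : String) (slot : Option String) (k v : String) : Option String :=
  if slot.isNone && k == key && !(v == "") then some v else slot

-- the single pass over the headers
def pvB_scan : List (String × String) → PvSlots → PvSlots
  | [], s => s
  | h :: t, s =>
    let k := PySem.Str.lower h.1
    let v := PySem.Str.strip h.2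
    pvB_scan t
      ⟨pvB_upd "cf-ipcountry" s.c1 k v, pvB_upd "x-appengine-country" s.c2 k v,
       pvB_upd "x-country-code" s.c3 k v, pvB_upd "x-geo-country" s.c4 k v,
       pvB_upd "x-appengine-region" s.r1 k v, pvB_upd "x-geo-region" s.r2 k v⟩

-- _usable: drop placeholder values
def pvB_usable (o : Option String) : Option String :=
  match o with
  | some v => if (["T1", "XX", "UNKNOWN"] : List String).contains (PySem.Str.upper v) then none else some v
  | none => none

def build_approximate_location_py_alt (headers : List (String × String)) (provider_approximate_location : Option String) : String :=
  let s := pvB_scan headers ⟨none, none, none, none, none, none⟩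
  let country := pvB_usable ([s.c1, s.c2, s.c3, s.c4].findSome? id)
  let region := pvB_usable ([s.r1, s.r2].findSome? id)
  match country, region with
  | some c, some r => if c == r then c else c ++ " / " ++ r
  | some c, none => c
  | none, some r => r
  | none, none =>
    match provider_approximate_location with
    | some p => if !(p == "") then p else pvCoarseUnavailable
    | none => pvCoarseUnavailable

-- ===== PRECONDITION & SPEC =====
def Spec_build_approximate_location_py (headers : List (String × String)) (provider_approximate_location : Option String) (out : String) : Prop := out = build_approximate_location_py_alt headers provider_approximate_location
instance (headers : List (String × String)) (provider_approximate_location : Option String) (out : String) : Decidable (Spec_build_approximate_location_py headers provider_approximate_location out) := by unfold Spec_build_approximate_location_py; infer_instance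

-- ===== CLAIM (what is proved, stated in full; the proofs are below) =====
def Claim_equal_build_approximate_location_py : Prop := ∀ (headers : List (String × String)) (provider_approximate_location : Option String), Dom_build_approximate_location_py headers provider_approximate_location → Spec_build_approximate_location_py headers provider_approximate_location (build_approximate_location_py headers provider_approximate_location)

-- ===== LEMMAS AND PROOFS =====

-- the evolution of ONE slot across the whole pass
def pvSlotRun (key : String) : List (String × String) → Option String → Option String
  | [], acc => acc
  | h :: t, acc => pvSlotRun key t (pvB_upd key acc (PySem.Str.lower h.1) (PySem.Str.strip h.2))

theorem pvB_scan_eq (hs : List (String × String)) (s : PvSlots) :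
    pvB_scan hs s =
      ⟨pvSlotRun "cf-ipcountry" hs s.c1, pvSlotRun "x-appengine-country" hs s.c2,
       pvSlotRun "x-country-code" hs s.c3, pvSlotRun "x-geo-country" hs s.c4,
       pvSlotRun "x-appengine-region" hs s.r1, pvSlotRun "x-geo-region" hs s.r2⟩ := by
  induction hs generalizing s with
  | nil => rfl
  | cons h t ih => simp only [pvB_scan, pvSlotRun]; exact ih _

-- a slot is the accumulator, else the first matching non-empty header
theorem pvSlotRun_eq (key : String) (hs : List (String × String)) (acc : Option String) :
    pvSlotRun key hs acc =
      acc.or ((hs.find? (fun h =>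
          (PySem.Str.lower h.1 == key) && !(PySem.Str.strip h.2 == ""))).map
        (fun h => PySem.Str.strip h.2)) := by
  induction hs generalizing acc with
  | nil => simp [pvSlotRun]
  | cons h t ih =>
    simp only [pvSlotRun, List.find?]
    cases acc with
    | some a =>
      have : pvB_upd key (some a) (PySem.Str.lower h.1) (PySem.Str.strip h.2) = some a := by
        simp [pvB_upd]
      rw [this, ih]
      cases hp : ((PySem.Str.lower h.1 == key) && !(PySem.Str.strip h.2 == "")) <;> simp_all
    | none =>
      by_cases hp : ((PySem.Str.lower h.1 == key) && !(PySem.Str.strip h.2 == "")) = true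
      · have : pvB_upd key none (PySem.Str.lower h.1) (PySem.Str.strip h.2) =
            some (PySem.Str.strip h.2) := by
          simp only [pvB_upd, Option.isNone_none, Bool.true_and]
          rw [hp]; rfl
        rw [this, ih, hp]; simp
      · rw [Bool.not_eq_true] at hp
        have : pvB_upd key none (PySem.Str.lower h.1) (PySem.Str.strip h.2) = none := by
          simp only [pvB_upd, Option.isNone_none, Bool.true_and]
          rw [hp]; rfl
        rw [this, ih, hp]

-- A's candidate-name loop = chained .or of the per-name slots
theorem pvA_getHeader_eq (hs : List (String × String)) (names : List String) :
    pvA_getHeader hs names =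
      names.findSome? (fun n => pvSlotRun (PySem.Str.lower n) hs none) := by
  induction names with
  | nil => simp [pvA_getHeader]
  | cons n rest ih =>
    rw [List.findSome?_cons, pvSlotRun_eq, Option.none_or]
    simp only [pvA_getHeader]
    cases hf : hs.find? (fun h =>
        (PySem.Str.lower h.1 == PySem.Str.lower n) && !(PySem.Str.strip h.2 == "")) with
    | none => simp [ih]
    | some h => simp

theorem pv_toList_inj (s t : String) (h : s.toList = t.toList) : s = t :=
  String.toList_inj.mp h

theorem pv_join_two (a b : String) : PySem.Str.join " / " [a, b] = a ++ " / " ++ b := by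
  apply pv_toList_inj
  simp [PySem.Str.join, PySem.Chars.join_cons_cons, PySem.Chars.join_singleton]

theorem pv_join_one (a : String) : PySem.Str.join " / " [a] = a := by
  simp [PySem.Str.join, PySem.Chars.join_singleton]

-- the two tails agree on any pair of optional candidate values
theorem pv_tail_eq (country region : Option String) (prov : Option String)
    (hc : ∀ v, country = some v → (v == "") = false)
    (hr : ∀ v, region = some v → (v == "") = false) :
    (let location_parts := ([country, region].filterMap id).filter (fun v =>
        !(v == "") && !((["T1", "XX", "UNKNOWN"] : List String).contains (PySem.Str.upper v)))
     if location_parts ≠ [] then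
       PySem.Str.join " / " (PySem.List.dedup location_parts)
     else
       match prov with
       | some p => if p == "" then pvCoarseUnavailable else p
       | none => pvCoarseUnavailable) =
    (match pvB_usable country, pvB_usable region with
     | some c, some r => if c == r then c else c ++ " / " ++ r
     | some c, none => c
     | none, some r => r
     | none, none =>
       match prov with
       | some p => if !(p == "") then p else pvCoarseUnavailable
       | none => pvCoarseUnavailable) := by
  have hone : ∀ v : String, PySem.Set.ofList [v] = [v] := by
    intro v; simp [PySem.Set.ofList, PySem.Set.add]
  have htwo : ∀ c r : String, c ≠ r → PySem.Set.ofList [c, r] = [c, r] := by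
    intro c r h; simp [PySem.Set.ofList, PySem.Set.add, Ne.symm h]
  have hdup : ∀ v : String, PySem.Set.ofList [v, v] = [v] := by
    intro v; simp [PySem.Set.ofList, PySem.Set.add]
  cases country with
  | none =>
    cases region with
    | none => simp [pvB_usable]
    | some r =>
      have hr0 : r ≠ "" := by have := hr r rfl; simpa using this
      by_cases hb : PySem.Str.upper r = "T1" ∨ PySem.Str.upper r = "XX" ∨ PySem.Str.upper r = "UNKNOWN"
      · rcases hb with h | h | h <;> simp [pvB_usable, h]
      · push Not at hb
        simp [pvB_usable, hr0, hb.1, hb.2.1, hb.2.2, hone, pv_join_one]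
  | some c =>
    have hc0 : c ≠ "" := by have := hc c rfl; simpa using this
    by_cases hbc : PySem.Str.upper c = "T1" ∨ PySem.Str.upper c = "XX" ∨ PySem.Str.upper c = "UNKNOWN"
    · -- country is a placeholder: behaves as absent
      cases region with
      | none => rcases hbc with h | h | h <;> simp [pvB_usable, h]
      | some r =>
        have hr0 : r ≠ "" := by have := hr r rfl; simpa using this
        by_cases hbr : PySem.Str.upper r = "T1" ∨ PySem.Str.upper r = "XX" ∨ PySem.Str.upper r = "UNKNOWN"
        · rcases hbc with h | h | h <;> rcases hbr with h' | h' | h' <;> simp [pvB_usable, h, h']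
        · push Not at hbr
          rcases hbc with h | h | h <;>
            simp [pvB_usable, h, hr0, hbr.1, hbr.2.1, hbr.2.2, hone, pv_join_one]
    · push Not at hbc
      cases region with
      | none => simp [pvB_usable, hc0, hbc.1, hbc.2.1, hbc.2.2, hone, pv_join_one]
      | some r =>
        have hr0 : r ≠ "" := by have := hr r rfl; simpa using this
        by_cases hbr : PySem.Str.upper r = "T1" ∨ PySem.Str.upper r = "XX" ∨ PySem.Str.upper r = "UNKNOWN"
        · rcases hbr with h | h | h <;>
            simp [pvB_usable, h, hc0, hbc.1, hbc.2.1, hbc.2.2, hone, pv_join_one]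
        · push Not at hbr
          by_cases hcr : c = r
          · subst hcr
            simp [pvB_usable, hc0, hbc.1, hbc.2.1, hbc.2.2, hdup, pv_join_one]
          · simp [pvB_usable, hc0, hr0, hbc.1, hbc.2.1, hbc.2.2, hbr.1, hbr.2.1, hbr.2.2,
              hcr, htwo c r hcr, pv_join_two]

-- if every some-value in the slot list is non-empty, so is the picked value
theorem pv_findSome_ne (l : List (Option String))
    (h : ∀ o ∈ l, ∀ v, o = some v → (v == "") = false) :
    ∀ v, l.findSome? id = some v → (v == "") = false := by
  induction l with
  | nil => intro v hv; simp at hv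
  | cons o t ih =>
    intro v hv
    rw [List.findSome?_cons] at hv
    cases ho : o with
    | some w =>
      rw [ho] at hv; simp [id] at hv
      subst hv
      exact h o (List.mem_cons_self) w ho
    | none =>
      rw [ho] at hv; simp [id] at hv
      exact ih (fun o' ho' => h o' (List.mem_cons_of_mem _ ho')) v hv

-- any filled slot holds a non-empty (stripped) value
theorem pv_slot_ne (key : String) (headers : List (String × String)) :
    ∀ v, pvSlotRun key headers none = some v → (v == "") = false := by
  intro v hv
  rw [pvSlotRun_eq, Option.none_or] at hv
  cases hf : headers.find? (fun h =>
      (PySem.Str.lower h.1 == key) && !(PySem.Str.strip h.2 == "")) with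
  | none => rw [hf] at hv; simp at hv
  | some h =>
    rw [hf] at hv; simp at hv
    have := List.find?_eq_some_iff_append.mp hf |>.1
    rcases Bool.and_eq_true _ _ |>.mp this with ⟨_, h2⟩
    rw [← hv]
    simpa using h2

-- ===== VERDICT (by name: the statement is the Claim_ definition above) =====
theorem build_approximate_location_py_spec : Claim_equal_build_approximate_location_py := by
  intro headers prov _
  show build_approximate_location_py headers prov = build_approximate_location_py_alt headers prov
  unfold build_approximate_location_py build_approximate_location_py_alt
  rw [pvB_scan_eq]
  simp only []
  have hcountry : pvA_getHeader headers
      ["CF-IPCountry", "X-AppEngine-Country", "X-Country-Code", "X-Geo-Country"] =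
      ([pvSlotRun "cf-ipcountry" headers none, pvSlotRun "x-appengine-country" headers none,
        pvSlotRun "x-country-code" headers none,
        pvSlotRun "x-geo-country" headers none] : List (Option String)).findSome? id := by
    rw [pvA_getHeader_eq]
    have h1 : PySem.Str.lower "CF-IPCountry" = "cf-ipcountry" := by decide
    have h2 : PySem.Str.lower "X-AppEngine-Country" = "x-appengine-country" := by decide
    have h3 : PySem.Str.lower "X-Country-Code" = "x-country-code" := by decide
    have h4 : PySem.Str.lower "X-Geo-Country" = "x-geo-country" := by decide
    simp only [List.findSome?_cons, List.findSome?_nil, h1, h2, h3, h4, id]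
  have hregion : pvA_getHeader headers ["X-AppEngine-Region", "X-Geo-Region"] =
      ([pvSlotRun "x-appengine-region" headers none,
        pvSlotRun "x-geo-region" headers none] : List (Option String)).findSome? id := by
    rw [pvA_getHeader_eq]
    have h1 : PySem.Str.lower "X-AppEngine-Region" = "x-appengine-region" := by decide
    have h2 : PySem.Str.lower "X-Geo-Region" = "x-geo-region" := by decide
    simp only [List.findSome?_cons, List.findSome?_nil, h1, h2, id]
  rw [hcountry, hregion]
  exact pv_tail_eq _ _ prov
    (pv_findSome_ne _ (by
      intro o ho v hv
      simp only [List.mem_cons] at ho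
      rcases ho with h | h | h | h | h
      all_goals first
        | (subst h; exact pv_slot_ne _ headers v hv)
        | (exact absurd h (by simp))))
    (pv_findSome_ne _ (by
      intro o ho v hv
      simp only [List.mem_cons] at ho
      rcases ho with h | h | h
      all_goals first
        | (subst h; exact pv_slot_ne _ headers v hv)
        | (exact absurd h (by simp))))
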